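-- pv_equiv track=rewrite | github.com/NBO2001/UFAM---Atividades | IC/Atividades/Ex06/src/Ex06.py | rfinal
-- ===== SOURCE A (Python) =====
-- def verfica_media_e_frequencia(nota, frequencia):
--     return nota >= 5 and frequencia >= 70
--
-- def verfica_reprovado_por_frequencia(nota, frequencia):
--     return nota >= 5 and frequencia < 70
--
-- def verfica_reprovado_por_nota(nota, frequencia):
--     return nota < 5 and frequencia >= 70
--
-- def verfica_reprovado_por_nota_e_frequencia(nota, frequencia):
--     return nota < 5 and frequencia < 70
--
-- def rfinal(nfs):
--
--     return (
--         [
--             (cod, nota, freq)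
--             for cod, nota, freq in nfs
--             if verfica_media_e_frequencia(nota, freq)
--         ],
--         [
--             (cod, nota, freq)
--             for cod, nota, freq in nfs
--             if verfica_reprovado_por_nota(nota, freq)
--         ],
--         [
--             (cod, nota, freq)
--             for cod, nota, freq in nfs
--             if verfica_reprovado_por_frequencia(nota, freq)
--         ],
--         [
--             (cod, nota, freq)
--             for cod, nota, freq in nfs
--             if verfica_reprovado_por_nota_e_frequencia(nota, freq)
--         ],
--     )
-- ===== SOURCE B (Python) =====
-- def rfinal(nfs):
--     aprovados, rep_nota, rep_freq, rep_ambos = [], [], [], []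
--     for cod, nota, freq in nfs:
--         if nota >= 5:
--             (aprovados if freq >= 70 else rep_freq).append((cod, nota, freq))
--         else:
--             (rep_nota if freq >= 70 else rep_ambos).append((cod, nota, freq))
--     return (aprovados, rep_nota, rep_freq, rep_ambos)
-- ===== Notes on version B (the rewrite author's own statement) =====
-- stated objective: simpler
-- what changed: Replaces four separate filtering passes (each re-testing the predicates) with a single classifying loop that appends each record to exactly one of four buckets.
import Mathlib
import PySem

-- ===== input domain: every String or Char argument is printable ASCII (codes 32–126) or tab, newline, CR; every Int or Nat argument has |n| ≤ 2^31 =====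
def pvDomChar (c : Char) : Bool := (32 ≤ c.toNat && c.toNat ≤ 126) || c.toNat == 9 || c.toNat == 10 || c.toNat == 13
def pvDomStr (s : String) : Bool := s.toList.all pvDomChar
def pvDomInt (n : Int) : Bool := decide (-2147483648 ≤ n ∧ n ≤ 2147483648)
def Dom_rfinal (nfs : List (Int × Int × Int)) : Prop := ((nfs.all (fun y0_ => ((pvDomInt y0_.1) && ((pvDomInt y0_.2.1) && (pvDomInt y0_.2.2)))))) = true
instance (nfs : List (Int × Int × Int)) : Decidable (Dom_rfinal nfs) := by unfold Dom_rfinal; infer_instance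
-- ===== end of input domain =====

-- ===== PORT A =====
-- B: single classifying pass with four accumulators instead of A's four filtering passes (simpler).
def verfica_media_e_frequencia (nota freq : Int) : Bool := nota ≥ 5 && freq ≥ 70
def verfica_reprovado_por_frequencia (nota freq : Int) : Bool := nota ≥ 5 && freq < 70
def verfica_reprovado_por_nota (nota freq : Int) : Bool := nota < 5 && freq ≥ 70
def verfica_reprovado_por_nota_e_frequencia (nota freq : Int) : Bool := nota < 5 && freq < 70
def rfinal (nfs : List (Int × Int × Int)) : (List (Int × Int × Int)) × (List (Int × Int × Int)) × (List (Int × Int × Int)) × (List (Int × Int × Int)) :=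
  ( nfs.filter (fun x => verfica_media_e_frequencia x.2.1 x.2.2),
    nfs.filter (fun x => verfica_reprovado_por_nota x.2.1 x.2.2),
    nfs.filter (fun x => verfica_reprovado_por_frequencia x.2.1 x.2.2),
    nfs.filter (fun x => verfica_reprovado_por_nota_e_frequencia x.2.1 x.2.2) )

-- ===== PORT B =====
def rfinal_alt (nfs : List (Int × Int × Int)) : (List (Int × Int × Int)) × (List (Int × Int × Int)) × (List (Int × Int × Int)) × (List (Int × Int × Int)) :=
  nfs.foldl
    (fun acc x =>
      let (ap, rn, rf, ra) := acc
      if x.2.1 ≥ 5 then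
        if x.2.2 ≥ 70 then (ap ++ [x], rn, rf, ra) else (ap, rn, rf ++ [x], ra)
      else
        if x.2.2 ≥ 70 then (ap, rn ++ [x], rf, ra) else (ap, rn, rf, ra ++ [x]))
    ([], [], [], [])

-- ===== PRECONDITION & SPEC =====
def Spec_rfinal (nfs : List (Int × Int × Int)) (out : (List (Int × Int × Int)) × (List (Int × Int × Int)) × (List (Int × Int × Int)) × (List (Int × Int × Int))) : Prop := out = rfinal_alt nfs
instance (nfs : List (Int × Int × Int)) (out : (List (Int × Int × Int)) × (List (Int × Int × Int)) × (List (Int × Int × Int)) × (List (Int × Int × Int))) : Decidable (Spec_rfinal nfs out) := by unfold Spec_rfinal; infer_instance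

-- ===== CLAIM (what is proved, stated in full; the proofs are below) =====
def Claim_equal_rfinal : Prop := ∀ (nfs : List (Int × Int × Int)), Dom_rfinal nfs → Spec_rfinal nfs (rfinal nfs)

-- ===== LEMMAS AND PROOFS =====

-- ===== VERDICT (by name: the statement is the Claim_ definition above) =====
theorem rfinal_alt_inv (nfs : List (Int × Int × Int)) (ap rn rf ra : List (Int × Int × Int)) :
    nfs.foldl
      (fun acc x =>
        let (ap, rn, rf, ra) := acc
        if x.2.1 ≥ 5 then
          if x.2.2 ≥ 70 then (ap ++ [x], rn, rf, ra) else (ap, rn, rf ++ [x], ra)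
        else
          if x.2.2 ≥ 70 then (ap, rn ++ [x], rf, ra) else (ap, rn, rf, ra ++ [x]))
      (ap, rn, rf, ra)
    = (ap ++ nfs.filter (fun x => verfica_media_e_frequencia x.2.1 x.2.2),
       rn ++ nfs.filter (fun x => verfica_reprovado_por_nota x.2.1 x.2.2),
       rf ++ nfs.filter (fun x => verfica_reprovado_por_frequencia x.2.1 x.2.2),
       ra ++ nfs.filter (fun x => verfica_reprovado_por_nota_e_frequencia x.2.1 x.2.2)) := by
  induction nfs generalizing ap rn rf ra with
  | nil => simp
  | cons h t ih =>
    simp only [List.foldl_cons, List.filter_cons]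
    by_cases h1 : h.2.1 ≥ 5 <;> by_cases h2 : h.2.2 ≥ 70 <;>
      simp [ih, verfica_media_e_frequencia, verfica_reprovado_por_nota,
        verfica_reprovado_por_frequencia, verfica_reprovado_por_nota_e_frequencia,
        h1, h2]

theorem rfinal_spec : Claim_equal_rfinal := by
  intro nfs _
  unfold Spec_rfinal rfinal rfinal_alt
  rw [rfinal_alt_inv]
  simp
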